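-- pv_equiv track=rewrite | github.com/ccarballo50/anonim-meddocan | legacy/anonim_meddocan_real_.py | clip_right
-- ===== SOURCE A (Python) =====
-- STOP_TOKENS = [",", ";", ".", " y ", " e ", " con ", " sin ", " su ", " sus "]
--
-- def clip_right(text: str, start: int, end: int) -> int:
--     frag = text[start:end]
--     # {coma, punto, punto y coma}
--     cuts = [i for i in (frag.find(","), frag.find("."), frag.find(";")) if i != -1]
--     # conectores comunes
--     for kw in STOP_TOKENS:
--         k = frag.find(kw)
--         if k != -1:
--             cuts.append(k)
--     if not cuts:
--         return end
--     c = min(cuts)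
--     return start + c if c > 0 else end
-- ===== SOURCE B (Python) =====
-- STOP_TOKENS = [",", ";", ".", " y ", " e ", " con ", " sin ", " su ", " sus "]
--
-- def clip_right(text: str, start: int, end: int) -> int:
--     frag = text[start:end]
--     for i in range(len(frag)):
--         if any(frag.startswith(tok, i) for tok in STOP_TOKENS):
--             return end if i == 0 else start + i
--     return end
-- ===== Notes on version B (the rewrite author's own statement) =====
-- stated objective: alternative
-- what changed: Replaced A's per-token find()-and-min structure (collect each token's first occurrence, then take the minimum) with a single left-to-right scan over fragment positions that returns at the first index where any stop token matches.
import Mathlib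
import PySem

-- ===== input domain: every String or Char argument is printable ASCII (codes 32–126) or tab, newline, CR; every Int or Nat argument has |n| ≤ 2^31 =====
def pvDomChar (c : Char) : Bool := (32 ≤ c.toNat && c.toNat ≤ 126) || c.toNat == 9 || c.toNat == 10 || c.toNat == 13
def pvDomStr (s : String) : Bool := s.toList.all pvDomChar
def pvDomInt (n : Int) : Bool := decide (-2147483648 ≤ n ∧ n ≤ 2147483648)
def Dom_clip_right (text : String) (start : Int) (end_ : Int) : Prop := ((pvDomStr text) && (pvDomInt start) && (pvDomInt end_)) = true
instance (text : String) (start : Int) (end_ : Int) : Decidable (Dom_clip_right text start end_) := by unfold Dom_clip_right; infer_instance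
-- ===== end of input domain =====

-- B replaces A's per-token find-and-min structure by a single left-to-right scan over the
-- fragment's positions, returning at the first position where any stop token matches
-- (objective: alternative decomposition, same result; equivalence on the return value only).

-- ===== PORT A =====
-- STOP_TOKENS, as lists of characters
def pvStops : List (List Char) :=
  [[','], [';'], ['.'], [' ', 'y', ' '], [' ', 'e', ' '],
   [' ', 'c', 'o', 'n', ' '], [' ', 's', 'i', 'n', ' '],
   [' ', 's', 'u', ' '], [' ', 's', 'u', 's', ' ']]

-- cuts = [i for i in (frag.find(","), frag.find("."), frag.find(";")) if i != -1]
--        then the for-loop appending frag.find(kw) for kw in STOP_TOKENS when != -1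
def pvCuts (frag : List Char) : List Int :=
  let cuts := [PySem.Chars.find frag [','], PySem.Chars.find frag ['.'],
               PySem.Chars.find frag [';']].filter (fun i => i ≠ -1)
  pvStops.foldl (fun cs kw =>
    let k := PySem.Chars.find frag kw
    if k ≠ -1 then cs ++ [k] else cs) cuts

def clip_right (text : String) (start : Int) (end_ : Int) : Int :=
  let frag := PySem.List.slice text.toList (some start) (some end_)
  let cuts := pvCuts frag
  if cuts = [] then end_
  else
    -- c = min(cuts)  (cuts is nonempty here, so min? is some)
    match PySem.List.min? cuts (fun x => x) with
    | none => end_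
    | some c => if c > 0 then start + c else end_

-- ===== PORT B =====
-- any(frag.startswith(tok, i) for tok in STOP_TOKENS), applied to the suffix frag[i:]
def pvHit (s : List Char) : Bool := pvStops.any (fun tok => PySem.Chars.startswith s tok)

-- the for-loop over i in range(len(frag)): s is the current suffix frag[i:]
def pvScan (s : List Char) (i : Nat) : Option Nat :=
  match s with
  | [] => none
  | _ :: t => if pvHit s then some i else pvScan t (i + 1)

def clip_right_alt (text : String) (start : Int) (end_ : Int) : Int :=
  let frag := PySem.List.slice text.toList (some start) (some end_)
  match pvScan frag 0 with
  | none => end_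
  | some i => if i = 0 then end_ else start + (i : Int)

-- ===== PRECONDITION & SPEC =====
def Spec_clip_right (text : String) (start : Int) (end_ : Int) (out : Int) : Prop := out = clip_right_alt text start end_
instance (text : String) (start : Int) (end_ : Int) (out : Int) : Decidable (Spec_clip_right text start end_ out) := by unfold Spec_clip_right; infer_instance

-- ===== CLAIM (what is proved, stated in full; the proofs are below) =====
def Claim_equal_clip_right : Prop := ∀ (text : String) (start : Int) (end_ : Int), Dom_clip_right text start end_ → Spec_clip_right text start end_ (clip_right text start end_)

-- ===== LEMMAS AND PROOFS =====

theorem pvHit_iff (s : List Char) : pvHit s = true ↔ ∃ t ∈ pvStops, t <+: s := by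
  simp [pvHit, List.any_eq_true, PySem.Chars.startswith_iff]

theorem pvHit_nil : pvHit [] = false := by decide

-- membership in A's cuts list
theorem mem_pvCuts (frag : List Char) (c : Int) :
    c ∈ pvCuts frag ↔ ∃ t ∈ pvStops, PySem.Chars.find frag t = c ∧ c ≠ -1 := by
  unfold pvCuts
  rw [show (fun (cs : List Int) kw =>
        let k := PySem.Chars.find frag kw
        if k ≠ -1 then cs ++ [k] else cs)
      = (fun (cs : List Int) kw =>
        if (decide (PySem.Chars.find frag kw ≠ -1)) = true
        then cs ++ [PySem.Chars.find frag kw] else cs) from by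
    funext cs kw; simp]
  rw [PySem.List.foldl_append_if]
  simp only [pvStops, List.mem_append, List.mem_map, List.mem_filter, List.mem_cons,
    List.not_mem_nil, decide_eq_true_eq]
  constructor
  · rintro (h | h)
    · simp only [or_false] at h
      obtain ⟨h1, h2⟩ := h
      have h2' : c ≠ -1 := by simpa using h2
      rcases h1 with h | h | h
      · exact ⟨[','], by tauto, h.symm, h2'⟩
      · exact ⟨['.'], by tauto, h.symm, h2'⟩
      · exact ⟨[';'], by tauto, h.symm, h2'⟩
    · obtain ⟨t, ht, hc⟩ := h
      exact ⟨t, ht.1, hc, by rw [← hc]; exact ht.2⟩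
  · rintro ⟨t, ht, hfind, hne⟩
    right
    exact ⟨t, ⟨ht, by rw [hfind]; exact hne⟩, hfind⟩

theorem pvScan_cons (c : Char) (t : List Char) (i : Nat) :
    pvScan (c :: t) i = if pvHit (c :: t) then some i else pvScan t (i + 1) := rfl

-- B's scan: none means no position hits
theorem pvScan_eq_none_iff (s : List Char) (i : Nat) :
    pvScan s i = none ↔ ∀ j, pvHit (s.drop j) = false := by
  induction s generalizing i with
  | nil => simp [pvScan, pvHit_nil]
  | cons c t ih =>
    rw [pvScan_cons]
    by_cases h : pvHit (c :: t) = true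
    · rw [if_pos h]
      constructor
      · intro hc; exact absurd hc (by simp)
      · intro hall
        have := hall 0
        simp only [List.drop_zero] at this
        rw [h] at this; cases this
    · rw [if_neg h]
      have h' : pvHit (c :: t) = false := by simpa using h
      rw [ih]
      constructor
      · intro hall j
        cases j with
        | zero => simpa using h'
        | succ j => simpa [List.drop_succ_cons] using hall j
      · intro hall j; simpa [List.drop_succ_cons] using hall (j + 1)

-- B's scan: some k means k is the first hit position (relative to offset i)
theorem pvScan_eq_some (s : List Char) (i k : Nat) (h : pvScan s i = some k) :
    i ≤ k ∧ k - i < s.length ∧ pvHit (s.drop (k - i)) = true ∧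
      ∀ j < k - i, pvHit (s.drop j) = false := by
  induction s generalizing i with
  | nil => simp [pvScan] at h
  | cons c t ih =>
    rw [pvScan_cons] at h
    by_cases hh : pvHit (c :: t) = true
    · rw [if_pos hh] at h
      injection h with h
      subst h
      refine ⟨le_refl _, by simp, by simpa [Nat.sub_self] using hh, ?_⟩
      intro j hj; omega
    · rw [if_neg hh] at h
      have h' : pvHit (c :: t) = false := by simpa using hh
      obtain ⟨h1, h2, h3, h4⟩ := ih (i + 1) h
      refine ⟨by omega, by simp; omega, ?_, ?_⟩
      · have : k - i = (k - (i + 1)) + 1 := by omega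
        rw [this, List.drop_succ_cons]; exact h3
      · intro j hj
        cases j with
        | zero => simpa using h'
        | succ j =>
          rw [List.drop_succ_cons]
          exact h4 j (by omega)

-- find frag t ≤ j whenever t matches at position j
theorem find_le_of_prefix_drop (frag t : List Char) (j : Nat)
    (h : t <+: frag.drop j) : PySem.Chars.find frag t ≤ (j : Int) ∧ PySem.Chars.find frag t ≠ -1 := by
  have hin : PySem.Chars.find frag t ≠ -1 := by
    rw [PySem.Chars.find_ne_neg_one_iff, ← PySem.Chars.isIn_iff_infix,
      ← PySem.Chars.exists_prefix_drop_iff_isIn]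
    exact ⟨j, h⟩
  have hnn : 0 ≤ PySem.Chars.find frag t := by
    have := PySem.Chars.neg_one_le_find frag t
    omega
  obtain ⟨_, hmin⟩ := PySem.Chars.find_spec (s := frag) (sub := t) hnn
  constructor
  · by_contra hlt
    rw [not_le] at hlt
    exact hmin j (by omega) h
  · exact hin

-- ===== VERDICT (by name: the statement is the Claim_ definition above) =====
theorem clip_right_spec : Claim_equal_clip_right := by
  intro text start end_ _
  unfold Spec_clip_right clip_right clip_right_alt
  set frag := PySem.List.slice text.toList (some start) (some end_) with hfrag
  cases hscan : pvScan frag 0 with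
  | none =>
    -- no hit anywhere → cuts is empty → both return end_
    have hall := (pvScan_eq_none_iff frag 0).mp hscan
    have hcuts : pvCuts frag = [] := by
      by_contra hne
      obtain ⟨c, hc⟩ := List.exists_mem_of_ne_nil _ hne
      obtain ⟨t, ht, hfind, hcne⟩ := (mem_pvCuts frag c).mp hc
      have hnn : 0 ≤ PySem.Chars.find frag t := by
        have := PySem.Chars.neg_one_le_find frag t
        omega
      obtain ⟨hpre, _⟩ := PySem.Chars.find_spec (s := frag) (sub := t) hnn
      have : pvHit (frag.drop (PySem.Chars.find frag t).toNat) = true :=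
        (pvHit_iff _).mpr ⟨t, ht, hpre⟩
      rw [hall] at this
      exact absurd this (by simp)
    simp [hcuts, hscan]
  | some k =>
    obtain ⟨_, hklen, hhit, hmin⟩ := pvScan_eq_some frag 0 k hscan
    simp only [Nat.sub_zero] at hklen hhit hmin
    -- cuts is nonempty and its min is k
    obtain ⟨t0, ht0, hpre0⟩ := (pvHit_iff _).mp hhit
    obtain ⟨hle0, hne0⟩ := find_le_of_prefix_drop frag t0 k hpre0
    have hmem0 : PySem.Chars.find frag t0 ∈ pvCuts frag :=
      (mem_pvCuts frag _).mpr ⟨t0, ht0, rfl, hne0⟩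
    have hcne : pvCuts frag ≠ [] := by
      intro h; rw [h] at hmem0; exact absurd hmem0 (by simp)
    cases hm : PySem.List.min? (pvCuts frag) (fun x => x) with
    | none => exact absurd ((PySem.List.min?_eq_none_iff _ _).mp hm) hcne
    | some m =>
      -- m = k
      have hmmem := PySem.List.min?_mem hm
      obtain ⟨t, ht, hfind, hcne'⟩ := (mem_pvCuts frag m).mp hmmem
      have hmnn : 0 ≤ m := by
        have := PySem.Chars.neg_one_le_find frag t
        omega
      have hmk : m = (k : Int) := by
        -- lower: m ≤ find t0 ≤ k ; upper: hit at m.toNat so k ≤ m.toNat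
        have hlow : m ≤ (k : Int) := by
          have := PySem.List.min?_isMin hm _ hmem0
          simpa using le_trans this hle0
        have hnn : 0 ≤ PySem.Chars.find frag t := by omega
        obtain ⟨hpre, _⟩ := PySem.Chars.find_spec (s := frag) (sub := t) hnn
        have hhitm : pvHit (frag.drop m.toNat) = true := by
          refine (pvHit_iff _).mpr ⟨t, ht, ?_⟩
          rw [hfind] at hpre; exact hpre
        have hge : ¬ m.toNat < k := by
          intro hlt
          have := hmin m.toNat hlt
          rw [hhitm] at this; exact absurd this (by simp)
        omega
      subst hmk
      rw [if_neg hcne, hm]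
      by_cases hk0 : k = 0
      · subst hk0; simp [hscan]
      · have hpos : (0 : Int) < (k : Int) := by exact_mod_cast Nat.pos_of_ne_zero hk0
        simp [hscan, hk0]
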